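-- pv_equiv track=rewrite | github.com/invk007/codewars | problems/prefix_sum/highest_altitude.py | highest_altitude
-- ===== SOURCE A (Python) =====
-- def highest_altitude(gain: list[int]) -> int:
--     prefix = [0]
--     max_ = 0
--     for i in range(len(gain)):
--         prefix.append(gain[i] + prefix[-1])
--         if prefix[-1] > max_:
--             max_ = prefix[-1]
--     return max_
-- ===== SOURCE B (Python) =====
-- def highest_altitude(gain: list[int]) -> int:
--     # Right-to-left: best altitude reachable in the remaining suffix of the trip,
--     # via the recurrence M(g::rest) = max(0, g + M(rest)); no prefix sums at all.
--     best = 0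
--     for g in reversed(gain):
--         best = max(0, g + best)
--     return best
-- ===== Notes on version B (the rewrite author's own statement) =====
-- stated objective: alternative
-- what changed: B scans the gains right-to-left maintaining the best altitude reachable in the remaining suffix via the recurrence best = max(0, g + best), instead of A's left-to-right loop that builds a growing prefix-sum list and tracks a running max with an inline branch.
import Mathlib
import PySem

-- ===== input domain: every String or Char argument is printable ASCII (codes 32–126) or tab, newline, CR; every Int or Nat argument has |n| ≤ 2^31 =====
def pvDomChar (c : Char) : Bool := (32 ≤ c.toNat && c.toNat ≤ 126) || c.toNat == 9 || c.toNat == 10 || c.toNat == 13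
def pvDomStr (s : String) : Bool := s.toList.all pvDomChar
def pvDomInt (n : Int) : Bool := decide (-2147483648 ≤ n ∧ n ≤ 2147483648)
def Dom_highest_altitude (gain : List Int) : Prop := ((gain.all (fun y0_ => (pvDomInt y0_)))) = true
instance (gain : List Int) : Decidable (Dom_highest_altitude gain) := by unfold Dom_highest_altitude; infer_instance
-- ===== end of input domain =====

-- B scans the gains right-to-left with best = max(0, g + best) (best reachable altitude
-- in the remaining suffix), instead of A's prefix-sum list with an inline running max.


-- ===== PORT A =====
-- loop state: (prefix list, running max); prefix is never empty (starts as [0]),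
-- so prefix[-1] via pyGet? always returns some value and the .getD 0 default is never used.
def highest_altitude (gain : List Int) : Int :=
  (gain.foldl
    (fun (st : List Int × Int) g =>
      let v := g + (PySem.List.pyGet? st.1 (-1)).getD 0
      (st.1 ++ [v], if v > st.2 then v else st.2))
    ([0], 0)).2

-- ===== PORT B =====
-- reversed-iteration loop with accumulator best = max(0, g + best) is exactly a foldr
def highest_altitude_alt (gain : List Int) : Int :=
  gain.foldr (fun g best => max 0 (g + best)) 0

-- ===== PRECONDITION & SPEC =====
def Spec_highest_altitude (gain : List Int) (out : Int) : Prop := out = highest_altitude_alt gain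
instance (gain : List Int) (out : Int) : Decidable (Spec_highest_altitude gain out) := by unfold Spec_highest_altitude; infer_instance

-- ===== CLAIM (what is proved, stated in full; the proofs are below) =====
def Claim_equal_highest_altitude : Prop := ∀ (gain : List Int), Dom_highest_altitude gain → Spec_highest_altitude gain (highest_altitude gain)

-- ===== LEMMAS AND PROOFS =====

-- the prefix sums generated after the seed s
def pvSums (s : Int) : List Int → List Int
  | [] => []
  | g :: t => (s + g) :: pvSums (s + g) t

theorem pyGet_last (p : List Int) (v : Int) :
    (PySem.List.pyGet? (p ++ [v]) (-1)).getD 0 = v := by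
  simp [PySem.List.pyGet?, PySem.List.pyIdx?]

theorem aLoop_eq (l : List Int) : ∀ (p : List Int) (s m : Int),
    (PySem.List.pyGet? p (-1)).getD 0 = s →
    (l.foldl
      (fun (st : List Int × Int) g =>
        let v := g + (PySem.List.pyGet? st.1 (-1)).getD 0
        (st.1 ++ [v], if v > st.2 then v else st.2))
      (p, m)).2 = (pvSums s l).foldl max m := by
  induction l with
  | nil => intro p s m _; rfl
  | cons g t ih =>
    intro p s m hs
    simp only [List.foldl_cons, pvSums, hs]
    have h1 : g + s = s + g := by ring
    rw [h1]
    have := ih (p ++ [s + g]) (s + g) (max m (s + g)) (pyGet_last p (s + g))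
    rw [show (if s + g > m then s + g else m) = max m (s + g) by
      split_ifs with h <;> omega]
    exact this

theorem bFold_nonneg (l : List Int) : 0 ≤ l.foldr (fun g best => max 0 (g + best)) 0 := by
  cases l with
  | nil => simp
  | cons g t => simp [List.foldr_cons]

theorem sums_max_eq (l : List Int) : ∀ (s m : Int), s ≤ m →
    (pvSums s l).foldl max m = max m (s + l.foldr (fun g best => max 0 (g + best)) 0) := by
  induction l with
  | nil => intro s m h; simp [pvSums]; omega
  | cons g t ih =>
    intro s m h
    simp only [pvSums, List.foldl_cons, List.foldr_cons]
    rw [ih (s + g) (max m (s + g)) (by omega)]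
    have := bFold_nonneg t
    omega

-- ===== VERDICT (by name: the statement is the Claim_ definition above) =====
theorem highest_altitude_spec : Claim_equal_highest_altitude := by
  intro gain _
  unfold Spec_highest_altitude highest_altitude highest_altitude_alt
  rw [aLoop_eq gain [0] 0 0 (by rfl), sums_max_eq gain 0 0 le_rfl]
  have := bFold_nonneg gain
  omega
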